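-- pv_equiv track=rewrite | github.com/mouredev/Weekly-Challenge-2022-Kotlin | reto46.py | cordenadas
-- ===== SOURCE A (Python) =====
-- def cordenadas(lista):
--     mirar = 1
--     x = 0
--     y = 0
--
--     for i in lista:
--         if mirar == 1:
--             y += i
--         elif mirar == 2:
--             x -= i
--         elif mirar == 3:
--             y -= i
--         elif mirar == 4:
--             x += i
--             mirar = 0
--         mirar += 1
--
--     return f"Eje X={x} Eje Y={y}"
-- ===== SOURCE B (Python) =====
-- def cordenadas(lista):
--     pad = lista + [0] * (-len(lista) % 4)
--     x = 0
--     y = 0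
--     i = 0
--     while i < len(pad):
--         y += pad[i] - pad[i + 2]
--         x += pad[i + 3] - pad[i + 1]
--         i += 4
--     return f"Eje X={x} Eje Y={y}"
-- ===== Notes on version B (the rewrite author's own statement) =====
-- stated objective: alternative
-- what changed: A walks the list with a cyclic 4-state direction counter updated and reset element by element; B pads the list with zeros to a multiple of 4 and sums fixed per-chunk offsets (y += pad[i]-pad[i+2], x += pad[i+3]-pad[i+1]) with no direction state.
import Mathlib
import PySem

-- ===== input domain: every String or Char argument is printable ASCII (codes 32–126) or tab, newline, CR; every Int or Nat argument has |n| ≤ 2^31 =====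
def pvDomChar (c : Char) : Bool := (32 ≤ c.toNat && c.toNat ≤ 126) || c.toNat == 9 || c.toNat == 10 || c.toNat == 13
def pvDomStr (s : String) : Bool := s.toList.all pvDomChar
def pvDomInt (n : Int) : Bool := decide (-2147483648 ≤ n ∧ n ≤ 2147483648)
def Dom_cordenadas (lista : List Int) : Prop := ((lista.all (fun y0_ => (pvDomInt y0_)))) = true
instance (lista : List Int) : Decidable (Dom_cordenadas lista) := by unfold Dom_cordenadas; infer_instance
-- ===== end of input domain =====

-- B replaces A's cyclic 4-state counter with one pad-to-multiple-of-4 pass summing fixed offsets per chunk (objective: alternative).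

-- ===== PORT A =====
def stepA (st : Int × Int × Int) (i : Int) : Int × Int × Int :=
  let mirar := st.1
  let x := st.2.1
  let y := st.2.2
  if mirar = 1 then (mirar + 1, x, y + i)
  else if mirar = 2 then (mirar + 1, x - i, y)
  else if mirar = 3 then (mirar + 1, x, y - i)
  else if mirar = 4 then (0 + 1, x + i, y)
  else (mirar + 1, x, y)

def cordenadas (lista : List Int) : String :=
  let st := lista.foldl stepA (1, 0, 0)
  "Eje X=" ++ PySem.Int.toStr st.2.1 ++ " Eje Y=" ++ PySem.Int.toStr st.2.2

-- ===== PORT B =====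
def loopB (pad : List Int) (i : Nat) (x y : Int) : Int × Int :=
  if i < pad.length then
    loopB pad (i + 4)
      (x + (PySem.List.pyGetD pad ((i : Int) + 3) 0 - PySem.List.pyGetD pad ((i : Int) + 1) 0))
      (y + (PySem.List.pyGetD pad (i : Int) 0 - PySem.List.pyGetD pad ((i : Int) + 2) 0))
  else (x, y)
termination_by pad.length - i

def cordenadas_alt (lista : List Int) : String :=
  let pad := lista ++ List.replicate ((PySem.Int.mod (-(lista.length : Int)) 4).toNat) 0
  let st := loopB pad 0 0 0
  "Eje X=" ++ PySem.Int.toStr st.1 ++ " Eje Y=" ++ PySem.Int.toStr st.2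

-- ===== PRECONDITION & SPEC =====
def Spec_cordenadas (lista : List Int) (out : String) : Prop := out = cordenadas_alt lista
instance (lista : List Int) (out : String) : Decidable (Spec_cordenadas lista out) := by unfold Spec_cordenadas; infer_instance

-- ===== CLAIM (what is proved, stated in full; the proofs are below) =====
def Claim_equal_cordenadas : Prop := ∀ (lista : List Int), Dom_cordenadas lista → Spec_cordenadas lista (cordenadas lista)

-- ===== LEMMAS AND PROOFS =====

/-- Proof-only reference function: net (x, y) displacement of a movement list. -/
def walk : List Int → Int × Int
  | a :: b :: c :: d :: rest => ((walk rest).1 + d - b, (walk rest).2 + a - c)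
  | [] => (0, 0)
  | [a] => (0, a)
  | [a, b] => (-b, a)
  | [a, b, c] => (-b, a - c)

lemma key_A (l : List Int) (x y : Int) :
    (l.foldl stepA (1, x, y)).2.1 = x + (walk l).1 ∧
    (l.foldl stepA (1, x, y)).2.2 = y + (walk l).2 := by
  fun_induction walk l generalizing x y with
  | case1 a b c d rest ih =>
      have h : (a :: b :: c :: d :: rest).foldl stepA (1, x, y)
          = rest.foldl stepA (1, x - b + d, y + a - c) := by
        simp [List.foldl, stepA]
      rw [h]
      obtain ⟨h1, h2⟩ := ih (x - b + d) (y + a - c)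
      refine ⟨?_, ?_⟩ <;> simp [h1, h2] <;> ring
  | case2 => simp [List.foldl]
  | case3 a => simp [List.foldl, stepA]
  | case4 a b => simp [List.foldl, stepA]; ring
  | case5 a b c => simp [List.foldl, stepA]; constructor <;> ring

lemma key_B (pad : List Int) (i : Nat) (x y : Int) (h4 : 4 ∣ pad.length) (hi : 4 ∣ i) :
    loopB pad i x y = (x + (walk (pad.drop i)).1, y + (walk (pad.drop i)).2) := by
  fun_induction loopB pad i x y with
  | case1 i x y hlt ih =>
      have hle : i + 4 ≤ pad.length := by
        obtain ⟨k1, e1⟩ := h4; obtain ⟨k2, e2⟩ := hi; omega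
      have hd : pad.drop i
          = pad[i] :: pad[i+1] :: pad[i+2] :: pad[i+3] :: pad.drop (i + 4) := by
        rw [List.drop_eq_getElem_cons (by omega), List.drop_eq_getElem_cons (by omega),
            List.drop_eq_getElem_cons (by omega), List.drop_eq_getElem_cons (by omega)]
        norm_num
      have g0 : PySem.List.pyGetD pad (i : Int) 0 = pad[i] := by
        rw [PySem.List.pyGetD_natCast]; exact List.getD_eq_getElem _ _ (by omega)
      have g1 : PySem.List.pyGetD pad ((i : Int) + 1) 0 = pad[i+1] := by
        rw [show ((i : Int) + 1) = ((i + 1 : Nat) : Int) by push_cast; ring,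
            PySem.List.pyGetD_natCast]
        exact List.getD_eq_getElem _ _ (by omega)
      have g2 : PySem.List.pyGetD pad ((i : Int) + 2) 0 = pad[i+2] := by
        rw [show ((i : Int) + 2) = ((i + 2 : Nat) : Int) by push_cast; ring,
            PySem.List.pyGetD_natCast]
        exact List.getD_eq_getElem _ _ (by omega)
      have g3 : PySem.List.pyGetD pad ((i : Int) + 3) 0 = pad[i+3] := by
        rw [show ((i : Int) + 3) = ((i + 3 : Nat) : Int) by push_cast; ring,
            PySem.List.pyGetD_natCast]
        exact List.getD_eq_getElem _ _ (by omega)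
      rw [ih (by obtain ⟨k2, e2⟩ := hi; exact ⟨k2 + 1, by omega⟩), hd, g0, g1, g2, g3]
      simp [walk]; constructor <;> ring
  | case2 i x y hge =>
      rw [List.drop_of_length_le (by omega)]
      simp [walk]


lemma pad_walk (l : List Int) (k : Nat) (hmod : (l.length + k) % 4 = 0) (hk : k < 4) :
    walk (l ++ List.replicate k 0) = walk l := by
  fun_induction walk l generalizing k with
  | case1 a b c d rest ih =>
      have h : (a :: b :: c :: d :: rest) ++ List.replicate k 0
          = a :: b :: c :: d :: (rest ++ List.replicate k 0) := by simp
      rw [h]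
      have hmod' : (rest.length + k) % 4 = 0 := by simp at hmod; omega
      simp [walk, ih k hmod' hk]
  | case2 =>
      have : k = 0 := by simp at hmod; omega
      subst this; simp [walk]
  | case3 a =>
      have : k = 3 := by simp at hmod; omega
      subst this; simp [walk, List.replicate]
  | case4 a b =>
      have : k = 2 := by simp at hmod; omega
      subst this; simp [walk, List.replicate]
  | case5 a b c =>
      have : k = 1 := by simp at hmod; omega
      subst this; simp [walk, List.replicate]

lemma pad_count (n : Nat) :
    (PySem.Int.mod (-(n : Int)) 4).toNat = (4 - n % 4) % 4 := by
  rw [PySem.Int.mod_eq_emod_of_pos (by norm_num : (0:Int) < 4)]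
  omega

-- ===== VERDICT (by name: the statement is the Claim_ definition above) =====
theorem cordenadas_spec : Claim_equal_cordenadas := by
  intro lista _
  simp only [Spec_cordenadas, cordenadas, cordenadas_alt]
  have hk := pad_count lista.length
  set k := (PySem.Int.mod (-(lista.length : Int)) 4).toNat with hkdef
  have hmod : (lista.length + k) % 4 = 0 := by omega
  have hklt : k < 4 := by omega
  have h4 : 4 ∣ (lista ++ List.replicate k 0).length := by
    simp; omega
  have hb := key_B (lista ++ List.replicate k 0) 0 0 0 h4 ⟨0, rfl⟩
  simp only [List.drop_zero] at hb
  rw [hb, pad_walk lista k hmod hklt]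
  obtain ⟨h1, h2⟩ := key_A lista 0 0
  simp [h1, h2]
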